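-- pv_equiv track=rewrite | github.com/mrknight21/conversation_moderation_analysis | utils/general.py | merge_short_strings
-- ===== SOURCE A (Python) =====
-- def merge_short_strings(strings):
--     result = []
--     i = 0
--
--     while i < len(strings):
--         current = strings[i].strip()  # Remove leading/trailing spaces
--         current_tokens = current.split()
--
--         # Keep merging while current string has less than 3 tokens and there's a next string
--         while len(current_tokens) < 4 and i + 1 < len(strings):
--             i += 1
--             next_string = strings[i].strip()
--             current += " " + next_string
--             current_tokens = current.split()
--
--         result.append(current)
--         i += 1  # Move to the next string
--
--     return result
-- ===== SOURCE B (Python) =====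
-- def merge_short_strings(strings):
--     result = []
--     group = []
--     count = 0
--     for s in strings:
--         piece = s.strip()
--         group.append(piece)
--         count += len(piece.split())
--         if count >= 4:
--             result.append(" ".join(group))
--             group = []
--             count = 0
--     if group:
--         result.append(" ".join(group))
--     return result
-- ===== Notes on version B (the rewrite author's own statement) =====
-- stated objective: faster
-- what changed: Single left-to-right pass that keeps the current group as a list of stripped pieces with an incrementally maintained token count, instead of A's nested while loops that re-strip-concatenate and re-split the whole accumulated string after every merge.
import Mathlib
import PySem

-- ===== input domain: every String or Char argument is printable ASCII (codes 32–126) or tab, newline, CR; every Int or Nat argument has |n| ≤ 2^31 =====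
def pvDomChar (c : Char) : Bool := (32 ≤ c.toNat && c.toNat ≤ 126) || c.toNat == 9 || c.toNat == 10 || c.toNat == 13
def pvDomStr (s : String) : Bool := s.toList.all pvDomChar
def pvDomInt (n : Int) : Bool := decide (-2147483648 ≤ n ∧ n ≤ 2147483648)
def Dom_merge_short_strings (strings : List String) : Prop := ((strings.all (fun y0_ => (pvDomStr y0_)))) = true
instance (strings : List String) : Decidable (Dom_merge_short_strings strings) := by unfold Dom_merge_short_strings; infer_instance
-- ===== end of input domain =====

-- B replaces A's re-splitting of the whole accumulated string after every merge by an
-- incremental token count over a single pass (objective: faster).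

-- ===== PORT A =====
-- A's inner while loop: keep merging the next (stripped) string into `current`
-- while current has fewer than 4 tokens and a next string exists.
-- `strings.getD i ""` is exact here: the loop guards keep the Nat index i in range.
def mssInner (strings : List String) (i : Nat) (current : List Char) : Nat × List Char :=
  if _h : (PySem.Chars.split₀ current).length < 4 ∧ i + 1 < strings.length then
    mssInner strings (i + 1)
      (current ++ ' ' :: PySem.Chars.strip (strings.getD (i + 1) "").toList)
  else (i, current)
termination_by strings.length - i
decreasing_by exact Nat.sub_lt_sub_left (Nat.lt_of_succ_lt _h.2) (Nat.lt_succ_self i)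

-- the inner loop never moves the index backwards (termination measure of the outer loop)
lemma mssInner_le (strings : List String) (i : Nat) (current : List Char) :
    i ≤ (mssInner strings i current).1 := by
  generalize hn : strings.length - i = n
  induction n using Nat.strong_induction_on generalizing i current with
  | _ n IH =>
    rw [mssInner]
    split
    · next h =>
        exact Nat.le_of_succ_le (IH (strings.length - (i + 1))
          (hn ▸ Nat.sub_lt_sub_left (Nat.lt_of_succ_lt h.2) (Nat.lt_succ_self i)) (i + 1)
          (current ++ ' ' :: PySem.Chars.strip (strings.getD (i + 1) "").toList) rfl)
    · exact Nat.le_refl i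

-- A's outer while loop over the index i, appending each merged group to `result`.
def mssOuter (strings : List String) (i : Nat) (result : List String) : List String :=
  if _h : i < strings.length then
    let p := mssInner strings i (PySem.Chars.strip (strings.getD i "").toList)
    mssOuter strings (p.1 + 1) (result ++ [String.ofList p.2])
  else result
termination_by strings.length - i
decreasing_by
  exact Nat.lt_of_le_of_lt
    (Nat.sub_le_sub_left (Nat.succ_le_succ
      (mssInner_le strings i (PySem.Chars.strip (strings.getD i "").toList))) strings.length)
    (Nat.sub_lt_sub_left _h (Nat.lt_succ_self i))

def merge_short_strings (strings : List String) : List String :=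
  mssOuter strings 0 []

-- ===== PORT B =====
-- one fold over the strings, carrying (result, current group of stripped pieces, running token count)
def altStep (st : List String × List (List Char) × Nat) (s : String) :
    List String × List (List Char) × Nat :=
  let piece := PySem.Chars.strip s.toList
  let group := st.2.1 ++ [piece]
  let count := st.2.2 + (PySem.Chars.split₀ piece).length
  if 4 ≤ count then (st.1 ++ [String.ofList (PySem.Chars.join [' '] group)], [], 0)
  else (st.1, group, count)

def merge_short_strings_alt (strings : List String) : List String :=
  let st := strings.foldl altStep ([], [], 0)
  if st.2.1 = [] then st.1
  else st.1 ++ [String.ofList (PySem.Chars.join [' '] st.2.1)]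

-- ===== PRECONDITION & SPEC =====
def Spec_merge_short_strings (strings : List String) (out : List String) : Prop := out = merge_short_strings_alt strings
instance (strings : List String) (out : List String) : Decidable (Spec_merge_short_strings strings out) := by unfold Spec_merge_short_strings; infer_instance

-- ===== CLAIM (what is proved, stated in full; the proofs are below) =====
def Claim_equal_merge_short_strings : Prop := ∀ (strings : List String), Dom_merge_short_strings strings → Spec_merge_short_strings strings (merge_short_strings strings)

-- ===== LEMMAS AND PROOFS =====

-- the accumulator of split₀.go is a reversed prefix of the result
lemma split_go_acc (b : List Char) : ∀ cur acc,
    PySem.Chars.split₀.go b cur acc = acc.reverse ++ PySem.Chars.split₀.go b cur [] := by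
  induction b with
  | nil =>
      intro cur acc
      simp only [PySem.Chars.split₀.go]
      by_cases h : cur.isEmpty <;> simp [h]
  | cons c rest ih =>
      intro cur acc
      simp only [PySem.Chars.split₀.go]
      by_cases hs : PySem.Chars.isspace c
      · by_cases h : cur.isEmpty
        · simp [hs, h, ih [] acc]
        · simp only [hs, h, if_true, if_false, Bool.false_eq_true]
          rw [ih [] (cur.reverse :: acc), ih [] [cur.reverse]]
          simp
      · simp only [hs, Bool.false_eq_true, if_false]
        exact ih (c :: cur) acc

-- splitting at an explicit space splits independently on both sides
lemma split_go_space (b a : List Char) : ∀ cur acc,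
    PySem.Chars.split₀.go (a ++ ' ' :: b) cur acc
      = PySem.Chars.split₀.go a cur acc ++ PySem.Chars.split₀ b := by
  induction a with
  | nil =>
      intro cur acc
      simp only [List.nil_append, PySem.Chars.split₀.go, PySem.Chars.split₀]
      have hsp : PySem.Chars.isspace ' ' = true := by decide
      by_cases h : cur.isEmpty
      · simp [hsp, h, split_go_acc b [] acc]
      · simp only [hsp, h, if_true, if_false, Bool.false_eq_true]
        rw [split_go_acc b [] (cur.reverse :: acc)]
  | cons c a' ih =>
      intro cur acc
      simp only [List.cons_append, PySem.Chars.split₀.go]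
      by_cases hs : PySem.Chars.isspace c
      · by_cases h : cur.isEmpty <;> simp [hs, h, ih]
      · simp [hs, ih]

lemma split₀_space (a b : List Char) :
    PySem.Chars.split₀ (a ++ ' ' :: b) = PySem.Chars.split₀ a ++ PySem.Chars.split₀ b := by
  simpa [PySem.Chars.split₀] using split_go_space b a [] []

-- appending one more piece to a nonempty group
lemma join_snoc (g : List (List Char)) (p : List Char) (hg : g ≠ []) :
    PySem.Chars.join [' '] (g ++ [p]) = PySem.Chars.join [' '] g ++ ' ' :: p := by
  induction g with
  | nil => exact absurd rfl hg
  | cons q g' ih =>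
      cases g' with
      | nil => simp [PySem.Chars.join_cons_cons, PySem.Chars.join_singleton]
      | cons r t =>
          rw [show (q :: r :: t) ++ [p] = q :: r :: (t ++ [p]) from rfl,
              PySem.Chars.join_cons_cons,
              show r :: (t ++ [p]) = (r :: t) ++ [p] from rfl, ih (by simp),
              PySem.Chars.join_cons_cons [' '] q r t]
          simp

-- B's loop in structural form (result, group, count over the remaining suffix)
def bRun : List String → List String → List (List Char) → Nat → List String
  | [], res, g, _ =>
      if g = [] then res else res ++ [String.ofList (PySem.Chars.join [' '] g)]
  | s :: t, res, g, c =>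
      let piece := PySem.Chars.strip s.toList
      let c' := c + (PySem.Chars.split₀ piece).length
      if 4 ≤ c' then
        bRun t (res ++ [String.ofList (PySem.Chars.join [' '] (g ++ [piece]))]) [] 0
      else bRun t res (g ++ [piece]) c'

lemma bRun_eq_fold (l : List String) : ∀ res g c,
    bRun l res g c =
      (let st := l.foldl altStep (res, g, c);
       if st.2.1 = [] then st.1
       else st.1 ++ [String.ofList (PySem.Chars.join [' '] st.2.1)]) := by
  induction l with
  | nil => intro res g c; simp [bRun]
  | cons s t ih =>
      intro res g c
      simp only [bRun, List.foldl_cons]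
      by_cases h4 : 4 ≤ c + (PySem.Chars.split₀ (PySem.Chars.strip s.toList)).length
      · simp [h4, altStep, ih]
      · simp [h4, altStep, ih]

-- main simulation: A's index loops compute B's loop on the corresponding suffix
lemma main_sim (strings : List String) : ∀ n i, strings.length - i = n →
    ((∀ res g current, i < strings.length → g ≠ [] →
        current = PySem.Chars.join [' '] g →
        (PySem.Chars.split₀ current).length < 4 →
        mssOuter strings ((mssInner strings i current).1 + 1)
            (res ++ [String.ofList (mssInner strings i current).2])
          = bRun (strings.drop (i + 1)) res g ((PySem.Chars.split₀ current).length))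
     ∧ (∀ res, mssOuter strings i res = bRun (strings.drop i) res [] 0)) := by
  intro n
  induction n using Nat.strong_induction_on with
  | _ n IH =>
    intro i hn
    have hInner : ∀ res g current, i < strings.length → g ≠ [] →
        current = PySem.Chars.join [' '] g →
        (PySem.Chars.split₀ current).length < 4 →
        mssOuter strings ((mssInner strings i current).1 + 1)
            (res ++ [String.ofList (mssInner strings i current).2])
          = bRun (strings.drop (i + 1)) res g ((PySem.Chars.split₀ current).length) := by
      intro res g current hi hg hcur hlt
      by_cases h2 : i + 1 < strings.length
      · have hget : strings.getD (i + 1) "" = strings[i + 1] := List.getD_eq_getElem _ _ h2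
        generalize hpg : PySem.Chars.strip (strings.getD (i + 1) "").toList = piece
        have hpi : PySem.Chars.strip (strings[i + 1]).toList = piece := by
          rw [← hget]; exact hpg
        have hdrop : strings.drop (i + 1) = strings[i + 1] :: strings.drop (i + 1 + 1) :=
          List.drop_eq_getElem_cons h2
        have hcur' : current ++ ' ' :: piece = PySem.Chars.join [' '] (g ++ [piece]) := by
          rw [join_snoc g piece hg, hcur]
        have hlen : (PySem.Chars.split₀ (current ++ ' ' :: piece)).length
            = (PySem.Chars.split₀ current).length + (PySem.Chars.split₀ piece).length := by
          rw [split₀_space]; simp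
        have hstep : mssInner strings i current
            = mssInner strings (i + 1) (current ++ ' ' :: piece) := by
          conv_lhs => rw [mssInner]
          rw [dif_pos ⟨hlt, h2⟩, hpg]
        by_cases h4 : 4 ≤ (PySem.Chars.split₀ current).length + (PySem.Chars.split₀ piece).length
        · have hcond : ¬ ((PySem.Chars.split₀ (current ++ ' ' :: piece)).length < 4
              ∧ i + 1 + 1 < strings.length) := by rw [hlen]; omega
          have hstop : mssInner strings (i + 1) (current ++ ' ' :: piece)
              = (i + 1, current ++ ' ' :: piece) := by
            rw [mssInner, dif_neg hcond]
          rw [hstep, hstop]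
          show mssOuter strings (i + 1 + 1) (res ++ [String.ofList (current ++ ' ' :: piece)]) = _
          have hout := (IH (strings.length - (i + 1 + 1)) (by omega) (i + 1 + 1) rfl).2
            (res ++ [String.ofList (current ++ ' ' :: piece)])
          rw [hout, hdrop]
          simp only [bRun]
          rw [hpi, if_pos h4, ← hcur']
        · have hlt' : (PySem.Chars.split₀ (current ++ ' ' :: piece)).length < 4 := by
            rw [hlen]; omega
          have hinner := (IH (strings.length - (i + 1)) (by omega) (i + 1) rfl).1
            res (g ++ [piece]) (current ++ ' ' :: piece) h2 (by simp) hcur' hlt'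
          rw [hstep, hinner, hlen, hdrop]
          simp only [bRun]
          rw [hpi, if_neg h4]
      · have hstop : mssInner strings i current = (i, current) := by
          rw [mssInner, dif_neg (fun hc => h2 hc.2)]
        rw [hstop]
        show mssOuter strings (i + 1) (res ++ [String.ofList current]) = _
        have hdrop : strings.drop (i + 1) = [] := List.drop_eq_nil_of_le (by omega)
        rw [mssOuter, dif_neg h2, hdrop]
        simp only [bRun]
        rw [if_neg hg, hcur]
    refine ⟨hInner, ?_⟩
    intro res
    by_cases hi : i < strings.length
    · have hget : strings.getD i "" = strings[i] := List.getD_eq_getElem _ _ hi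
      have hdrop : strings.drop i = strings[i] :: strings.drop (i + 1) :=
        List.drop_eq_getElem_cons hi
      rw [mssOuter, dif_pos hi]
      generalize hpg : PySem.Chars.strip (strings.getD i "").toList = piece
      have hpi : PySem.Chars.strip (strings[i]).toList = piece := by
        rw [← hget]; exact hpg
      by_cases h4 : 4 ≤ (PySem.Chars.split₀ piece).length
      · have hstop : mssInner strings i piece = (i, piece) := by
          rw [mssInner, dif_neg (fun hc => absurd hc.1 (by omega))]
        rw [hstop]
        show mssOuter strings (i + 1) (res ++ [String.ofList piece]) = _
        have hout := (IH (strings.length - (i + 1)) (by omega) (i + 1) rfl).2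
          (res ++ [String.ofList piece])
        rw [hout, hdrop]
        simp only [bRun]
        rw [hpi, if_pos (by omega), List.nil_append, PySem.Chars.join_singleton]
      · have hinner := hInner res [piece] piece hi (by simp)
          (PySem.Chars.join_singleton [' '] piece).symm (by omega)
        show mssOuter strings ((mssInner strings i piece).1 + 1)
            (res ++ [String.ofList (mssInner strings i piece).2]) = _
        rw [hinner, hdrop]
        simp only [bRun]
        rw [hpi, if_neg (by omega), List.nil_append, Nat.zero_add]
    · have hdrop : strings.drop i = [] := List.drop_eq_nil_of_le (by omega)
      rw [mssOuter, dif_neg hi, hdrop]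
      simp [bRun]

-- ===== VERDICT (by name: the statement is the Claim_ definition above) =====
theorem merge_short_strings_spec : Claim_equal_merge_short_strings := by
  intro strings _
  unfold Spec_merge_short_strings merge_short_strings
  have h := (main_sim strings (strings.length - 0) 0 rfl).2 []
  rw [h]
  simp only [List.drop_zero]
  rw [bRun_eq_fold]
  rfl
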